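-- pv_equiv track=rewrite | github.com/JasperChiu/git-test3 | sequence.py | accumulat_orginal_while
-- ===== SOURCE A (Python) =====
-- def accumulat_orginal_while(n):
--     # 使用while迴圈計算1-2+3-4+5... 循序計算複雜度O(n)
--     i = 1
--     judge_posorneg = 1
--     acc_sum = 0
--     while i < (n+1):
--         acc_sum += i * judge_posorneg
--         judge_posorneg *= -1
--         i += 1
--     return acc_sum
-- ===== SOURCE B (Python) =====
-- def accumulat_orginal_while(n):
--     # closed form for 1-2+3-4+...±n: O(1)
--     if n <= 0:
--         return 0
--     if n % 2 == 0:
--         return -(n // 2)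
--     return (n + 1) // 2
-- ===== Notes on version B (the rewrite author's own statement) =====
-- stated objective: faster
-- what changed: replaced the O(n) while-loop accumulation by a constant-time closed-form formula for the alternating sum, split on the sign and parity of n
import Mathlib
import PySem

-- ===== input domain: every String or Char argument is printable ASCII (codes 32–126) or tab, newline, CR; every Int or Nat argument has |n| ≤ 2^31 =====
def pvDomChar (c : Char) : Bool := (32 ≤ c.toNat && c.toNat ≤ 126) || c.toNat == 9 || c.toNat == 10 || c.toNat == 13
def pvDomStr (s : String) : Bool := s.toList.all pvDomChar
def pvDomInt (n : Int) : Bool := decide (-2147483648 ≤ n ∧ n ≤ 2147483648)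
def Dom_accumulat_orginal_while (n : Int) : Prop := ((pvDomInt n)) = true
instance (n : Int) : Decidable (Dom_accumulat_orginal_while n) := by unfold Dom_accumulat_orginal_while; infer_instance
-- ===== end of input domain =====

-- B replaces A's O(n) while-loop alternating-sum accumulation by a constant-time closed-form formula (objective: faster; measured asymptotic speed-up).


-- ===== PORT A =====
-- loop state: (i, judge_posorneg, acc_sum); fuel = number of remaining iterations
def pvLoopA (i judge acc : Int) : Nat → Int
  | 0 => acc
  | fuel + 1 => pvLoopA (i + 1) (judge * -1) (acc + i * judge) fuel

def accumulat_orginal_while (n : Int) : Int :=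
  -- while i < n+1 starting at i = 1 runs exactly max 0 n times
  pvLoopA 1 1 0 n.toNat

-- ===== PORT B =====
def accumulat_orginal_while_alt (n : Int) : Int :=
  if n ≤ 0 then 0
  else if PySem.Int.mod n 2 = 0 then -(PySem.Int.floordiv n 2)
  else PySem.Int.floordiv (n + 1) 2

-- ===== PRECONDITION & SPEC =====
def Spec_accumulat_orginal_while (n : Int) (out : Int) : Prop := out = accumulat_orginal_while_alt n
instance (n : Int) (out : Int) : Decidable (Spec_accumulat_orginal_while n out) := by unfold Spec_accumulat_orginal_while; infer_instance

-- ===== CLAIM (what is proved, stated in full; the proofs are below) =====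
def Claim_equal_accumulat_orginal_while : Prop := ∀ (n : Int), Dom_accumulat_orginal_while n → Spec_accumulat_orginal_while n (accumulat_orginal_while n)

-- ===== LEMMAS AND PROOFS =====

-- ===== VERDICT (by name: the statement is the Claim_ definition above) =====
-- peel the LAST iteration off the loop
theorem pvLoopA_succ (m : Nat) : ∀ (i judge acc : Int),
    pvLoopA i judge acc (m + 1) = pvLoopA i judge acc m + (i + m) * judge * (-1) ^ m := by
  induction m with
  | zero => intro i judge acc; simp [pvLoopA]
  | succ k ih =>
      intro i judge acc
      have h1 : pvLoopA i judge acc (k + 2) = pvLoopA (i + 1) (judge * -1) (acc + i * judge) (k + 1) := rfl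
      have h2 : pvLoopA i judge acc (k + 1) = pvLoopA (i + 1) (judge * -1) (acc + i * judge) k := rfl
      rw [h1, ih, h2]
      push_cast; ring

theorem pvLoopA_closed (m : Nat) :
    pvLoopA 1 1 0 m = if m % 2 = 0 then -((m : Int) / 2) else ((m : Int) + 1) / 2 := by
  induction m with
  | zero => simp [pvLoopA]
  | succ k ih =>
      rw [pvLoopA_succ, ih]
      rcases Nat.even_or_odd k with he | ho
      · have hp : ((-1 : Int)) ^ k = 1 := he.neg_one_pow
        obtain ⟨t, ht⟩ := he
        subst ht
        simp only [hp]
        push_cast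
        have : (t + t) % 2 = 0 := by omega
        have h2 : (t + t + 1) % 2 = 1 := by omega
        simp only [this, h2]
        norm_num
        omega
      · have hp : ((-1 : Int)) ^ k = -1 := ho.neg_one_pow
        obtain ⟨t, ht⟩ := ho
        subst ht
        simp only [hp]
        push_cast
        have h1 : (2 * t + 1) % 2 = 1 := by omega
        have h2 : (2 * t + 1 + 1) % 2 = 0 := by omega
        simp only [h1, h2]
        norm_num
        omega

theorem accumulat_orginal_while_spec : Claim_equal_accumulat_orginal_while := by
  intro n _
  unfold Spec_accumulat_orginal_while accumulat_orginal_while accumulat_orginal_while_alt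
  rw [pvLoopA_closed]
  by_cases h : n ≤ 0
  · have h0 : n.toNat = 0 := Int.toNat_of_nonpos h
    rw [h0, if_pos h]
    norm_num
  · have hc : (n.toNat : Int) = n := Int.toNat_of_nonneg (by omega)
    rw [if_neg h,
        PySem.Int.mod_eq_emod_of_pos (a := n) (by norm_num),
        PySem.Int.floordiv_eq_ediv_of_pos (a := n) (by norm_num),
        PySem.Int.floordiv_eq_ediv_of_pos (a := n + 1) (by norm_num)]
    by_cases he : n.toNat % 2 = 0
    · rw [if_pos he, if_pos (show n % 2 = 0 by omega), hc]
    · rw [if_neg he, if_neg (show ¬ n % 2 = 0 by omega), hc]
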